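-- pv_equiv track=rewrite | github.com/mabuphongram/YCC-Thesis | API/word_segmentation.py | find_longest_matching_word
-- ===== SOURCE A (Python) =====
-- def find_longest_matching_word(sentence, word_list, forward=True):
--     if forward:
--         for i in range(len(sentence), 0, -1):
--             word = sentence[:i]
--             if word.lower() in word_list:
--                 return word
--     else:
--         for i in range(len(sentence), 0, -1):
--             word = sentence[-i:]
--             if word.lower() in word_list:
--                 return word
--     return sentence[0] if forward else sentence[-1]
-- ===== SOURCE B (Python) =====
-- def find_longest_matching_word(sentence, word_list, forward=True):
--     # Single pass over word_list: a word w matches iff it equals the lowercased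
--     # slice of its own length; keep the maximal matching length.
--     best = 0
--     for w in word_list:
--         k = len(w)
--         if k > best:
--             seg = sentence[:k] if forward else sentence[-k:]
--             if seg.lower() == w:
--                 best = k
--     if best > 0:
--         return sentence[:best] if forward else sentence[-best:]
--     return sentence[0] if forward else sentence[-1]
-- ===== Notes on version B (the rewrite author's own statement) =====
-- stated objective: faster
-- what changed: Instead of scanning slice lengths from len(sentence) down and doing a linear membership test in word_list for each, B makes a single pass over word_list, checking each word against the lowercased slice of its own length and keeping the maximal matching length.
import Mathlib
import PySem

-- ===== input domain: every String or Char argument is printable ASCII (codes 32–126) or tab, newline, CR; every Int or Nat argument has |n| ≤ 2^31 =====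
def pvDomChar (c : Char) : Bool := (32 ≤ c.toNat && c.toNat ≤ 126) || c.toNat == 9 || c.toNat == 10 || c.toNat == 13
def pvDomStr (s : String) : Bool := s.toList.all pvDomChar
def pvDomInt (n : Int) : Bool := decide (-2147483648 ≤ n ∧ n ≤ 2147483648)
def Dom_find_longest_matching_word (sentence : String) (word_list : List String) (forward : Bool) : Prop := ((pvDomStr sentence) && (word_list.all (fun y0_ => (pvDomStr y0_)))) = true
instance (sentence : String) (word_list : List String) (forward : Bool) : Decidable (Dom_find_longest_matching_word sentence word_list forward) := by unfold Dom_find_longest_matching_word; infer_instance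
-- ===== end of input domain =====

-- B replaces A's scan over slice lengths (each with a linear membership test) by a
-- single pass over word_list keeping the maximal matching word length.

-- shared slice helpers: sentence[:k] and sentence[-k:] (k ≥ 1 wherever evaluated)
def pvPrefix (s : String) (k : Nat) : String := PySem.Str.slice s none (some (k : Int))
def pvSuffix (s : String) (k : Nat) : String := PySem.Str.slice s (some (-(k : Int))) none
-- sentence[0] / sentence[-1] as one-character strings ("" only outside Pre_)
def pvHead (s : String) : String := match PySem.Str.pyGet? s 0 with | some c => String.ofList [c] | none => ""
def pvLast (s : String) : String := match PySem.Str.pyGet? s (-1) with | some c => String.ofList [c] | none => ""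

-- ===== PORT A =====
-- for i in range(len(sentence), 0, -1): word = sentence[:i]; if word.lower() in word_list: return word
def pvAFwd (s : String) (wl : List String) : Nat → String
  | 0 => pvHead s
  | i+1 =>
      let word := pvPrefix s (i+1)
      if wl.contains (PySem.Str.lower word) then word else pvAFwd s wl i

-- for i in range(len(sentence), 0, -1): word = sentence[-i:]; if word.lower() in word_list: return word
def pvABwd (s : String) (wl : List String) : Nat → String
  | 0 => pvLast s
  | i+1 =>
      let word := pvSuffix s (i+1)
      if wl.contains (PySem.Str.lower word) then word else pvABwd s wl i

def find_longest_matching_word (sentence : String) (word_list : List String) (forward : Bool) : String :=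
  if forward then pvAFwd sentence word_list sentence.toList.length
  else pvABwd sentence word_list sentence.toList.length

-- ===== PORT B =====
-- seg = sentence[:k] if forward else sentence[-k:]
def pvSl (s : String) (forward : Bool) (k : Nat) : String :=
  if forward then pvPrefix s k else pvSuffix s k

-- loop body: k = len(w); if k > best: seg = …; if seg.lower() == w: best = k
def pvBStep (s : String) (forward : Bool) (best : Nat) (w : String) : Nat :=
  let k := w.toList.length
  if best < k then
    let seg := pvSl s forward k
    if PySem.Str.lower seg == w then k else best
  else best

def find_longest_matching_word_alt (sentence : String) (word_list : List String) (forward : Bool) : String :=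
  let best := word_list.foldl (pvBStep sentence forward) 0
  if 0 < best then
    (if forward then pvPrefix sentence best else pvSuffix sentence best)
  else
    (if forward then pvHead sentence else pvLast sentence)

-- ===== PRECONDITION & SPEC =====
-- Pre_ excludes only the empty sentence, on which the Python A (and B) raise IndexError
-- at the fallback indexing sentence[0] / sentence[-1].
def Pre_find_longest_matching_word (sentence : String) (word_list : List String) (forward : Bool) : Prop := sentence ≠ ""
instance (sentence : String) (word_list : List String) (forward : Bool) : Decidable (Pre_find_longest_matching_word sentence word_list forward) := by unfold Pre_find_longest_matching_word; infer_instance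
def pvWitness_find_longest_matching_word : String × List String × Bool := ("Ab c", ["ab", "x"], true)

def Spec_find_longest_matching_word (sentence : String) (word_list : List String) (forward : Bool) (out : String) : Prop := out = find_longest_matching_word_alt sentence word_list forward
instance (sentence : String) (word_list : List String) (forward : Bool) (out : String) : Decidable (Spec_find_longest_matching_word sentence word_list forward out) := by unfold Spec_find_longest_matching_word; infer_instance

-- ===== CLAIM (what is proved, stated in full; the proofs are below) =====
def Claim_equal_find_longest_matching_word : Prop := ∀ (sentence : String) (word_list : List String) (forward : Bool), Dom_find_longest_matching_word sentence word_list forward → Pre_find_longest_matching_word sentence word_list forward → Spec_find_longest_matching_word sentence word_list forward (find_longest_matching_word sentence word_list forward)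

-- ===== LEMMAS AND PROOFS =====

-- the largest i in [1..·] with (slice i).lower() in wl, else 0 (A's loop finds it first)
def pvMM (wl : List String) (sl : Nat → String) : Nat → Nat
  | 0 => 0
  | i+1 => if wl.contains (PySem.Str.lower (sl (i+1))) then i+1 else pvMM wl sl i

-- w matches iff it is nonempty and equals the lowercased slice of its own length
def pvMatch (sl : Nat → String) (w : String) : Bool :=
  decide (0 < w.toList.length) && (PySem.Str.lower (sl w.toList.length) == w)

-- the maximal matching word length in wl (B's loop computes it)
def pvM (wl : List String) (sl : Nat → String) : Nat :=
  wl.foldr (fun w a => if pvMatch sl w then max w.toList.length a else a) 0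

theorem pvMM_le (wl : List String) (sl : Nat → String) : ∀ i, pvMM wl sl i ≤ i := by
  intro i; induction i with
  | zero => simp [pvMM]
  | succ i ih => simp only [pvMM]; split <;> omega

theorem pvMM_Q (wl : List String) (sl : Nat → String) :
    ∀ i, pvMM wl sl i ≠ 0 →
      wl.contains (PySem.Str.lower (sl (pvMM wl sl i))) = true ∧ 1 ≤ pvMM wl sl i := by
  intro i; induction i with
  | zero => simp [pvMM]
  | succ i ih =>
      simp only [pvMM]; split
      · intro _; constructor
        · simpa using ‹wl.contains (PySem.Str.lower (sl (i+1))) = true›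
        · omega
      · exact ih

theorem le_pvMM (wl : List String) (sl : Nat → String) :
    ∀ i j, 1 ≤ j → j ≤ i → wl.contains (PySem.Str.lower (sl j)) = true → j ≤ pvMM wl sl i := by
  intro i; induction i with
  | zero => intro j h1 h2 _; omega
  | succ i ih =>
      intro j h1 h2 hq
      simp only [pvMM]; split
      · omega
      · rcases Nat.lt_or_ge j (i+1) with h | h
        · exact ih j h1 (by omega) hq
        · exfalso; have : j = i + 1 := by omega
          subst this; simp_all
      
theorem pvM_cons (wl : List String) (sl : Nat → String) (w : String) :
    pvM (w :: wl) sl = if pvMatch sl w then max w.toList.length (pvM wl sl) else pvM wl sl := rfl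

theorem le_pvM (wl : List String) (sl : Nat → String) :
    ∀ w, w ∈ wl → pvMatch sl w = true → w.toList.length ≤ pvM wl sl := by
  induction wl with
  | nil => intro w hw; simp at hw
  | cons x xs ih =>
      intro w hw hm
      rw [pvM_cons]
      rcases List.mem_cons.mp hw with h | h
      · subst h; simp [hm]
      · have := ih w h hm
        split <;> omega

theorem pvM_spec (wl : List String) (sl : Nat → String) :
    pvM wl sl = 0 ∨ ∃ w ∈ wl, pvMatch sl w = true ∧ w.toList.length = pvM wl sl := by
  induction wl with
  | nil => left; rfl
  | cons x xs ih =>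
      rw [pvM_cons]
      by_cases hm : pvMatch sl x = true
      · rw [if_pos hm]
        rcases Nat.le_total x.toList.length (pvM xs sl) with h | h
        · rw [Nat.max_eq_right h]
          rcases ih with h0 | ⟨w, hw, hmw, hlw⟩
          · rw [h0]; rw [h0] at h
            right; exact ⟨x, by simp, hm, by omega⟩
          · right; exact ⟨w, by simp [hw], hmw, hlw⟩
        · rw [Nat.max_eq_left h]
          right; exact ⟨x, by simp, hm, rfl⟩
      · rw [if_neg hm]
        rcases ih with h0 | ⟨w, hw, hmw, hlw⟩
        · left; exact h0
        · right; exact ⟨w, by simp [hw], hmw, hlw⟩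

theorem pv_length_lower (s : String) : (PySem.Str.lower s).toList.length = s.toList.length := by
  simp [PySem.Str.toList_lower, PySem.Chars.lower]

theorem pvM_eq_pvMM (wl : List String) (sl : Nat → String) (n : Nat)
    (hlen : ∀ k, 0 < k → (sl k).toList.length = min k n) :
    pvM wl sl = pvMM wl sl n := by
  apply Nat.le_antisymm
  · rcases pvM_spec wl sl with h0 | ⟨w, hw, hm, hlw⟩
    · omega
    · simp only [pvMatch, Bool.and_eq_true, decide_eq_true_eq, beq_iff_eq] at hm
      obtain ⟨hpos, heq⟩ := hm
      set m := w.toList.length with hmdef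
      have hlen_sl : (sl m).toList.length = min m n := hlen m hpos
      have hwlen : (PySem.Str.lower (sl m)).toList.length = min m n := by
        rw [pv_length_lower]; exact hlen_sl
      have hmn : m ≤ n := by
        rw [heq] at hwlen
        omega
      have hq : wl.contains (PySem.Str.lower (sl m)) = true := by
        rw [heq]
        exact List.elem_eq_true_of_mem hw
      calc pvM wl sl = m := hlw.symm
        _ ≤ pvMM wl sl n := le_pvMM wl sl n m hpos hmn hq
  · by_cases h0 : pvMM wl sl n = 0
    · omega
    · obtain ⟨hq, h1⟩ := pvMM_Q wl sl n h0
      set m := pvMM wl sl n with hmdef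
      have hmn : m ≤ n := pvMM_le wl sl n
      have hw : PySem.Str.lower (sl m) ∈ wl := by
        simpa using hq
      have hlw : (PySem.Str.lower (sl m)).toList.length = m := by
        rw [pv_length_lower, hlen m (by omega)]; omega
      have hm : pvMatch sl (PySem.Str.lower (sl m)) = true := by
        unfold pvMatch
        rw [hlw]
        simp only [beq_self_eq_true, Bool.and_true, decide_eq_true_eq]
        omega
      have := le_pvM wl sl _ hw hm
      rw [hlw] at this
      exact this

theorem pvBStep_eq (s : String) (fwd : Bool) (b : Nat) (w : String) :
    pvBStep s fwd b w = if pvMatch (pvSl s fwd) w then max b w.toList.length else b := by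
  unfold pvBStep pvMatch
  generalize w.toList.length = k
  rcases hbeq : (PySem.Str.lower (pvSl s fwd k) == w) <;>
    by_cases hk : 0 < k <;>
      by_cases hb : b < k <;>
        simp [hbeq, hk, hb] <;> omega

theorem pvB_foldl (s : String) (fwd : Bool) :
    ∀ (wl : List String) (b : Nat),
      wl.foldl (pvBStep s fwd) b = max b (pvM wl (pvSl s fwd)) := by
  intro wl; induction wl with
  | nil => intro b; simp [pvM]
  | cons w ws ih =>
      intro b
      rw [List.foldl_cons, ih, pvBStep_eq, pvM_cons]
      split <;> omega

theorem pvAFwd_eq (s : String) (wl : List String) :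
    ∀ i, pvAFwd s wl i =
      if pvMM wl (pvSl s true) i = 0 then pvHead s
      else pvPrefix s (pvMM wl (pvSl s true) i) := by
  intro i; induction i with
  | zero => simp [pvAFwd, pvMM]
  | succ i ih =>
      simp only [pvAFwd, pvMM, pvSl, if_true]
      split
      · simp
      · simpa using ih

theorem pvABwd_eq (s : String) (wl : List String) :
    ∀ i, pvABwd s wl i =
      if pvMM wl (pvSl s false) i = 0 then pvLast s
      else pvSuffix s (pvMM wl (pvSl s false) i) := by
  intro i; induction i with
  | zero => simp [pvABwd, pvMM]
  | succ i ih =>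
      simp only [pvABwd, pvMM, pvSl, if_false, Bool.false_eq_true]
      split
      · simp
      · simpa using ih

theorem pv_len_prefix (s : String) (k : Nat) :
    (pvPrefix s k).toList.length = min k s.toList.length := by
  simp [pvPrefix, PySem.List.slice_to_natCast]

theorem pv_len_suffix (s : String) (k : Nat) (hk : 0 < k) :
    (pvSuffix s k).toList.length = min k s.toList.length := by
  rw [pvSuffix, PySem.Str.toList_slice, PySem.Chars.slice_eq_listSlice,
      PySem.List.slice_from_neg_natCast s.toList k hk]
  rw [List.length_drop]
  omega

-- ===== VERDICT (by name: the statement is the Claim_ definition above) =====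
theorem find_longest_matching_word_spec : Claim_equal_find_longest_matching_word := by
  intro sentence word_list forward _ _
  unfold Spec_find_longest_matching_word
  unfold find_longest_matching_word find_longest_matching_word_alt
  cases forward
  · simp only [Bool.false_eq_true, ite_false]
    rw [pvABwd_eq, pvB_foldl, Nat.zero_max,
        pvM_eq_pvMM word_list (pvSl sentence false) sentence.toList.length
          (fun k hk => by simpa [pvSl] using pv_len_suffix sentence k hk)]
    split <;> rename_i h
    · rw [if_neg (by omega)]
    · rw [if_pos (by omega)]
  · simp only [if_true]
    rw [pvAFwd_eq, pvB_foldl, Nat.zero_max,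
        pvM_eq_pvMM word_list (pvSl sentence true) sentence.toList.length
          (fun k _ => by simpa [pvSl] using pv_len_prefix sentence k)]
    split <;> rename_i h
    · rw [if_neg (by omega)]
    · rw [if_pos (by omega)]
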